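-- pv_equiv track=rewrite | github.com/Pinokcio/Algorithm | 22-05/count-prefixes-of-a-given-string.py | countPrefixes
-- ===== SOURCE A (Python) =====
-- from typing import List
--
-- def countPrefixes(words: List[str], s: str) -> int:
--     cnt = 0
--     for w in words:
--         length = len(w)
--         if length > len(s):
--             continue
--         for i in range(length):
--             if s[i] != w[i]:
--                 break
--         else:
--             cnt += 1
--     return cnt
-- ===== SOURCE B (Python) =====
-- def countPrefixes(words, s):
--     prefixes = {s[:i] for i in range(len(s) + 1)}
--     return sum(1 for w in words if w in prefixes)
-- ===== Notes on version B (the rewrite author's own statement) =====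
-- stated objective: alternative
-- what changed: Replaces A's per-word character-by-character scan (with break/else) by precomputing the set of all prefixes of s once and counting words by set membership.
import Mathlib
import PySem

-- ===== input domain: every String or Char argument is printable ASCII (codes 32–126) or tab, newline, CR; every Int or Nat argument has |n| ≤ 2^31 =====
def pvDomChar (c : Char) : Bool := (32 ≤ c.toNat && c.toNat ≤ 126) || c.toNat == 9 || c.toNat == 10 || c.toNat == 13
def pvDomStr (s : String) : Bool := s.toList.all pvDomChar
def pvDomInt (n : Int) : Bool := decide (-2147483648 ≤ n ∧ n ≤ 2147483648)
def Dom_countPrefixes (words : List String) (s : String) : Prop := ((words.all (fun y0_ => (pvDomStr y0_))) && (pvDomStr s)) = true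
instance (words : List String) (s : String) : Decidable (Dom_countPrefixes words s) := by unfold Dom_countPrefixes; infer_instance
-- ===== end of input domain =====

-- B precomputes the set of all prefixes of s and counts words by membership,
-- replacing A's per-word char-by-char scan; same result, different decomposition.

-- ===== PORT A =====
-- inner for-loop over range(length) with break/else: all indices match ⇒ cnt += 1.
-- indices i < length ≤ len(s) are always in range, so s[i]/w[i] are ported as total [i]? lookups.
def countPrefixes (words : List String) (s : String) : Int :=
  words.foldl
    (fun cnt w =>
      let length := w.toList.length
      if length > s.toList.length then cnt
      else if (List.range length).all (fun i => s.toList[i]? == w.toList[i]?) then cnt + 1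
      else cnt)
    0

-- ===== PORT B =====
-- prefixes = {s[:i] for i in range(len(s)+1)} ; sum(1 for w in words if w in prefixes)
-- s[:i] for 0 ≤ i is s.toList.take i (PySem.List.slice_to_natCast).
def countPrefixes_alt (words : List String) (s : String) : Int :=
  let prefixes : PySem.Set String :=
    PySem.Set.ofList ((List.range (s.toList.length + 1)).map (fun i => String.ofList (s.toList.take i)))
  words.foldl (fun acc w => if PySem.Set.contains prefixes w then acc + 1 else acc) 0

-- ===== PRECONDITION & SPEC =====
def Spec_countPrefixes (words : List String) (s : String) (out : Int) : Prop := out = countPrefixes_alt words s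
instance (words : List String) (s : String) (out : Int) : Decidable (Spec_countPrefixes words s out) := by unfold Spec_countPrefixes; infer_instance

-- ===== CLAIM (what is proved, stated in full; the proofs are below) =====
def Claim_equal_countPrefixes : Prop := ∀ (words : List String) (s : String), Dom_countPrefixes words s → Spec_countPrefixes words s (countPrefixes words s)

-- ===== LEMMAS AND PROOFS =====

-- A's per-word condition holds iff w (as a char list) is a prefix of s.
theorem condA_iff_prefix (s w : String) :
    (¬ w.toList.length > s.toList.length ∧
      (List.range w.toList.length).all (fun i => s.toList[i]? == w.toList[i]?) = true)
    ↔ w.toList <+: s.toList := by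
  rw [List.prefix_iff_getElem]
  constructor
  · rintro ⟨hlen, hall⟩
    have hlen' : w.toList.length ≤ s.toList.length := by omega
    refine ⟨hlen', ?_⟩
    intro i hi
    have := List.all_eq_true.mp hall i (List.mem_range.mpr hi)
    rw [List.getElem?_eq_getElem (Nat.lt_of_lt_of_le hi hlen'),
        List.getElem?_eq_getElem hi, beq_iff_eq, Option.some.injEq] at this
    exact this.symm
  · rintro ⟨hlen, h⟩
    refine ⟨by omega, ?_⟩
    rw [List.all_eq_true]
    intro i hi
    have hi' := List.mem_range.mp hi
    rw [List.getElem?_eq_getElem (Nat.lt_of_lt_of_le hi' hlen),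
        List.getElem?_eq_getElem hi', beq_iff_eq, Option.some.injEq]
    exact (h i hi').symm

-- B's membership test holds iff w is a prefix of s.
theorem memB_iff_prefix (s w : String) :
    PySem.Set.contains
      (PySem.Set.ofList ((List.range (s.toList.length + 1)).map (fun i => String.ofList (s.toList.take i)))) w = true
    ↔ w.toList <+: s.toList := by
  have hcon : ∀ (l : List String), PySem.Set.contains l w = true ↔ w ∈ l := by
    intro l
    simp [PySem.Set.contains]
  rw [hcon, PySem.Set.mem_ofList, List.mem_map]
  constructor
  · rintro ⟨i, _, rfl⟩
    simpa using List.take_prefix i s.toList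
  · intro hp
    refine ⟨w.toList.length, List.mem_range.mpr (by have := hp.length_le; omega), ?_⟩
    rw [← List.prefix_iff_eq_take.mp hp, String.ofList_toList]

theorem countPrefixes_spec : Claim_equal_countPrefixes := by
  intro words s _
  unfold Spec_countPrefixes countPrefixes countPrefixes_alt
  have hstep : (fun (cnt : Int) (w : String) =>
      let length := w.toList.length
      if length > s.toList.length then cnt
      else if (List.range length).all (fun i => s.toList[i]? == w.toList[i]?) then cnt + 1
      else cnt)
    = (fun (acc : Int) (w : String) =>
      if PySem.Set.contains
        (PySem.Set.ofList ((List.range (s.toList.length + 1)).map (fun i => String.ofList (s.toList.take i)))) w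
      then acc + 1 else acc) := by
    funext acc w
    show (if w.toList.length > s.toList.length then acc
      else if (List.range w.toList.length).all (fun i => s.toList[i]? == w.toList[i]?) then acc + 1
      else acc) = _
    by_cases hp : w.toList <+: s.toList
    · obtain ⟨h1, h2⟩ := (condA_iff_prefix s w).mpr hp
      rw [if_neg h1, if_pos h2, if_pos ((memB_iff_prefix s w).mpr hp)]
    · rw [if_neg (fun h => hp ((memB_iff_prefix s w).mp h))]
      by_cases hl : w.toList.length > s.toList.length
      · rw [if_pos hl]
      · rw [if_neg hl, if_neg (fun h => hp ((condA_iff_prefix s w).mp ⟨hl, h⟩))]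
  rw [hstep]

-- ===== VERDICT (by name: the statement is the Claim_ definition above) =====
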